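-- pv_equiv track=rewrite | github.com/sstrohkorb/railroad-game-design-prototyping | path_funx.py | get_piecelist_from_path
-- ===== SOURCE A (Python) =====
-- def flow_direc(tuple1, tuple2):
--     y0, x0 = tuple1[0], tuple1[1]
--     y1, x1 = tuple2[0], tuple2[1]
--     flow = None
--     if y1 == y0:
--         if x1 - x0 == 1:
--             flow = 'r'
--         if x1 - x0 == -1:
--             flow = 'l'
--     elif x1 == x0:
--         if y1 - y0 == 1:
--             flow = 'd'
--         if y1 - y0 == -1:
--             flow = 'u'
--     return flow
--
-- def get_piecelist_from_path(path):
--     piecelist = []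
--     for i in range(1, len(path)-1):
--         a0 = path[i -1]
--         a1 = path[i]
--         a2 = path[i + 1]
--         piece = ''
--         inflow = flow_direc(a1, a0)
--         outflow = flow_direc(a1, a2)
--         flowset = set([inflow, outflow])
--         if flowset == set(['r', 'l']): piece = 'hz'
--         if flowset == set(['r', 'u']): piece = 'NE'
--         if flowset == set(['r', 'd']): piece = 'SE'
--         if flowset == set(['u', 'l']): piece = 'NW'
--         if flowset == set(['d', 'l']): piece = 'SW'
--         if flowset == set(['u', 'd']): piece = 'vt'
--         piecelist.append(piece)
--     return piecelist
-- ===== SOURCE B (Python) =====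
-- def _piece(a, b, c):
--     # offsets of both neighbors from the center point
--     uy, ux = a[0] - b[0], a[1] - b[1]
--     vy, vx = c[0] - b[0], c[1] - b[1]
--     # both neighbors must be orthogonally adjacent to the center
--     if abs(uy) + abs(ux) != 1 or abs(vy) + abs(vx) != 1:
--         return ''
--     sy, sx = uy + vy, ux + vx
--     if sy == 0 and sx == 0:          # opposite neighbors: straight piece
--         return 'hz' if uy == 0 else 'vt'
--     if sy == 0 or sx == 0:           # same neighbor direction twice: no piece
--         return ''
--     # perpendicular neighbors: corner named by the signs of the offset sum
--     return ('N' if sy < 0 else 'S') + ('E' if sx > 0 else 'W')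
--
--
-- def get_piecelist_from_path(path):
--     return [_piece(a, b, c) for a, b, c in zip(path, path[1:], path[2:])]
-- ===== Notes on version B (the rewrite author's own statement) =====
-- stated objective: alternative
-- what changed: A classifies every interior point by computing two symbolic direction characters and comparing a two-element set against six literal sets; B drops direction symbols and tables entirely and classifies each interior point arithmetically from the two neighbor-offset vectors: their sum distinguishes straight pieces (sum zero), degenerate repeats (one zero component) and corners, whose name N/S+E/W is built directly from the sum's signs.
import Mathlib
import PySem

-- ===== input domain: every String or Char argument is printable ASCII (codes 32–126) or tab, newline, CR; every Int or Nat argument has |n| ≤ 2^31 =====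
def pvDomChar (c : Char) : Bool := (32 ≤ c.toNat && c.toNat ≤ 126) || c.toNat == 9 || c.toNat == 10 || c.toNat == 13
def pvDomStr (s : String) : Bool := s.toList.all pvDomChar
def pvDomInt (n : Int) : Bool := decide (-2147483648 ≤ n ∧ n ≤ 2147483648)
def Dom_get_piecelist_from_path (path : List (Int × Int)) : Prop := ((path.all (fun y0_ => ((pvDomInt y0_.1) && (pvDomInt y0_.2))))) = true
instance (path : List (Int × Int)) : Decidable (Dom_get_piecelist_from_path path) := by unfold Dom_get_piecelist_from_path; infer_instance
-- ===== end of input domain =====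

-- B replaces A's symbolic direction characters and six literal set comparisons by a purely
-- arithmetic classification of the two neighbor-offset vectors (objective: alternative).

-- ===== PORT A =====
def flow_direc (tuple1 tuple2 : Int × Int) : Option String :=
  let y0 := tuple1.1; let x0 := tuple1.2
  let y1 := tuple2.1; let x1 := tuple2.2
  let flow : Option String := none
  if y1 = y0 then
    let flow := if x1 - x0 = 1 then some "r" else flow
    let flow := if x1 - x0 = -1 then some "l" else flow
    flow
  else if x1 = x0 then
    let flow := if y1 - y0 = 1 then some "d" else flow
    let flow := if y1 - y0 = -1 then some "u" else flow
    flow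
  else flow

def get_piecelist_from_path (path : List (Int × Int)) : List String :=
  (PySem.List.pyRange 1 ((path.length : Int) - 1) 1).foldl (fun piecelist i =>
    -- indices i-1, i, i+1 are always in range for i ∈ range(1, len-1), so the default is never used
    let a0 := PySem.List.pyGetD path (i - 1) (0, 0)
    let a1 := PySem.List.pyGetD path i (0, 0)
    let a2 := PySem.List.pyGetD path (i + 1) (0, 0)
    let piece := ""
    let inflow := flow_direc a1 a0
    let outflow := flow_direc a1 a2
    let flowset : PySem.Set (Option String) := PySem.Set.ofList [inflow, outflow]
    let piece := if PySem.Set.equal flowset (PySem.Set.ofList [some "r", some "l"]) then "hz" else piece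
    let piece := if PySem.Set.equal flowset (PySem.Set.ofList [some "r", some "u"]) then "NE" else piece
    let piece := if PySem.Set.equal flowset (PySem.Set.ofList [some "r", some "d"]) then "SE" else piece
    let piece := if PySem.Set.equal flowset (PySem.Set.ofList [some "u", some "l"]) then "NW" else piece
    let piece := if PySem.Set.equal flowset (PySem.Set.ofList [some "d", some "l"]) then "SW" else piece
    let piece := if PySem.Set.equal flowset (PySem.Set.ofList [some "u", some "d"]) then "vt" else piece
    piecelist ++ [piece]) []

-- ===== PORT B =====
def pvPiece (a b c : Int × Int) : String :=
  let uy := a.1 - b.1; let ux := a.2 - b.2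
  let vy := c.1 - b.1; let vx := c.2 - b.2
  if |uy| + |ux| ≠ 1 ∨ |vy| + |vx| ≠ 1 then ""
  else
    let sy := uy + vy; let sx := ux + vx
    if sy = 0 ∧ sx = 0 then (if uy = 0 then "hz" else "vt")
    else if sy = 0 ∨ sx = 0 then ""
    else (if sy < 0 then "N" else "S") ++ (if sx > 0 then "E" else "W")

def get_piecelist_from_path_alt (path : List (Int × Int)) : List String :=
  -- zip(path, path[1:], path[2:]) ported as a zip of the list with its two drops
  (path.zip ((path.drop 1).zip (path.drop 2))).map (fun t => pvPiece t.1 t.2.1 t.2.2)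

-- ===== PRECONDITION & SPEC =====
def Spec_get_piecelist_from_path (path : List (Int × Int)) (out : List String) : Prop := out = get_piecelist_from_path_alt path
instance (path : List (Int × Int)) (out : List String) : Decidable (Spec_get_piecelist_from_path path out) := by unfold Spec_get_piecelist_from_path; infer_instance

-- ===== CLAIM (what is proved, stated in full; the proofs are below) =====
def Claim_equal_get_piecelist_from_path : Prop := ∀ (path : List (Int × Int)), Dom_get_piecelist_from_path path → Spec_get_piecelist_from_path path (get_piecelist_from_path path)

-- ===== LEMMAS AND PROOFS =====

-- proof-only name for A's per-index body
def pieceA (inflow outflow : Option String) : String :=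
  let piece := ""
  let flowset : PySem.Set (Option String) := PySem.Set.ofList [inflow, outflow]
  let piece := if PySem.Set.equal flowset (PySem.Set.ofList [some "r", some "l"]) then "hz" else piece
  let piece := if PySem.Set.equal flowset (PySem.Set.ofList [some "r", some "u"]) then "NE" else piece
  let piece := if PySem.Set.equal flowset (PySem.Set.ofList [some "r", some "d"]) then "SE" else piece
  let piece := if PySem.Set.equal flowset (PySem.Set.ofList [some "u", some "l"]) then "NW" else piece
  let piece := if PySem.Set.equal flowset (PySem.Set.ofList [some "d", some "l"]) then "SW" else piece
  let piece := if PySem.Set.equal flowset (PySem.Set.ofList [some "u", some "d"]) then "vt" else piece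
  piece

-- |x| + |y| = 1 without absolute values
theorem unit_iff (x y : Int) : |x| + |y| = 1 ↔ (x = 0 ∧ (y = 1 ∨ y = -1)) ∨ (y = 0 ∧ (x = 1 ∨ x = -1)) := by
  rcases abs_cases x with ⟨hx, _⟩ | ⟨hx, _⟩ <;> rcases abs_cases y with ⟨hy, _⟩ | ⟨hy, _⟩ <;>
    rw [hx, hy] <;> omega

-- flow_direc takes five values, characterized by the offset vector q - p
theorem flow_cases (p q : Int × Int) :
    (flow_direc p q = none ∧ ¬((q.1 - p.1 = 0 ∧ (q.2 - p.2 = 1 ∨ q.2 - p.2 = -1)) ∨ (q.2 - p.2 = 0 ∧ (q.1 - p.1 = 1 ∨ q.1 - p.1 = -1)))) ∨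
    (flow_direc p q = some "r" ∧ q.1 - p.1 = 0 ∧ q.2 - p.2 = 1) ∨
    (flow_direc p q = some "l" ∧ q.1 - p.1 = 0 ∧ q.2 - p.2 = -1) ∨
    (flow_direc p q = some "d" ∧ q.1 - p.1 = 1 ∧ q.2 - p.2 = 0) ∨
    (flow_direc p q = some "u" ∧ q.1 - p.1 = -1 ∧ q.2 - p.2 = 0) := by
  dsimp only [flow_direc]
  split_ifs <;> simp_all <;> omega

-- A's per-index value equals B's arithmetic classification of the triple
set_option maxHeartbeats 1600000 in
theorem piece_pointwise (a b c : Int × Int) :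
    pieceA (flow_direc b a) (flow_direc b c) = pvPiece a b c := by
  rcases flow_cases b a with ⟨h1, hu⟩ | ⟨h1, hy, hx⟩ | ⟨h1, hy, hx⟩ | ⟨h1, hy, hx⟩ | ⟨h1, hy, hx⟩ <;>
  rcases flow_cases b c with ⟨h2, hv⟩ | ⟨h2, hy', hx'⟩ | ⟨h2, hy', hx'⟩ | ⟨h2, hy', hx'⟩ | ⟨h2, hy', hx'⟩ <;>
  · rw [h1, h2]
    dsimp only [pvPiece]
    first
      | (rw [if_pos (by simp only [ne_eq, unit_iff]; tauto)]; decide)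
      | (rw [hy, hx, hy', hx']; decide)

-- ===== VERDICT (by name: the statement is the Claim_ definition above) =====
theorem get_piecelist_from_path_spec : Claim_equal_get_piecelist_from_path := by
  intro path _
  unfold Spec_get_piecelist_from_path get_piecelist_from_path get_piecelist_from_path_alt
  rw [PySem.List.foldl_append_singleton_eq_map]
  simp only [List.nil_append]
  apply List.ext_getElem
  · simp only [List.length_map, PySem.List.length_pyRange_one, List.length_zip, List.length_drop]
    omega
  · intro k h1 h2
    have hk : k + 2 < path.length := by
      simp only [List.length_map, PySem.List.length_pyRange_one] at h1
      omega
    simp only [List.getElem_map, PySem.List.getElem_pyRange_one, List.getElem_zip,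
      List.getElem_drop, show 1 + k = k + 1 from by omega,
      show 2 + k = k + 2 from by omega]
    rw [show (1 : Int) + (k : Int) - 1 = ((k : Nat) : Int) by omega,
        show (1 : Int) + (k : Int) = (((k + 1 : Nat)) : Int) by omega,
        show (((k + 1 : Nat)) : Int) + 1 = (((k + 2 : Nat)) : Int) by omega]
    rw [PySem.List.pyGetD_eq_getElem _ _ (by positivity) (by exact_mod_cast by omega),
        PySem.List.pyGetD_eq_getElem _ _ (by positivity) (by exact_mod_cast by omega),
        PySem.List.pyGetD_eq_getElem _ _ (by positivity) (by exact_mod_cast by omega)]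
    simp only [Int.toNat_natCast]
    have h := piece_pointwise path[k] path[k + 1] path[k + 2]
    simpa only [pieceA] using h
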